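-- pv_equiv track=rewrite | github.com/Ramin-cs/RezaRepo | ultimate_router_backup_analyzer.py | _extract_advanced_features
-- ===== SOURCE A (Python) =====
-- from typing import Dict, List, Optional, Any, Tuple
--
-- def _extract_advanced_features(lines: List[str], brand: str) -> Dict[str, Any]:
--     """Extract advanced router features"""
--     features = {
--         'vpn_config': [],
--         'qos_settings': [],
--         'port_forwarding': [],
--         'dynamic_dns': [],
--         'snmp_config': [],
--         'logging_config': []
--     }
--
--     for line in lines:
--         line_lower = line.lower()
--
--         # VPN
--         if any(keyword in line_lower for keyword in ['vpn', 'ipsec', 'pptp', 'l2tp', 'openvpn']):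
--             features['vpn_config'].append(line.strip())
--
--         # QoS
--         if any(keyword in line_lower for keyword in ['qos', 'bandwidth', 'priority', 'traffic']):
--             features['qos_settings'].append(line.strip())
--
--         # Port forwarding
--         if any(keyword in line_lower for keyword in ['forward', 'nat', 'port', 'redirect']):
--             features['port_forwarding'].append(line.strip())
--
--         # SNMP
--         if 'snmp' in line_lower:
--             features['snmp_config'].append(line.strip())
--
--         # Logging
--         if any(keyword in line_lower for keyword in ['log', 'syslog', 'debug']):
--             features['logging_config'].append(line.strip())
--
--     return features
-- ===== SOURCE B (Python) =====
-- # Bucket-major re-implementation: a keyword table drives one scan per feature,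
-- # instead of a single line-major pass with inline branches per bucket.
-- _FEATURE_KEYWORDS = [
--     ('vpn_config', ('vpn', 'ipsec', 'pptp', 'l2tp', 'openvpn')),
--     ('qos_settings', ('qos', 'bandwidth', 'priority', 'traffic')),
--     ('port_forwarding', ('forward', 'nat', 'port', 'redirect')),
--     ('dynamic_dns', ()),
--     ('snmp_config', ('snmp',)),
--     ('logging_config', ('log', 'syslog', 'debug')),
-- ]
--
-- def _extract_advanced_features(lines, brand):
--     """Extract advanced router features"""
--     return {
--         name: [line.strip() for line in lines
--                if any(kw in line.lower() for kw in keywords)]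
--         for name, keywords in _FEATURE_KEYWORDS
--     }
-- ===== Notes on version B (the rewrite author's own statement) =====
-- stated objective: idiomatic
-- what changed: Replaces A's single line-major pass that mutates a dict via inline per-bucket branches with a declarative keyword table and a bucket-major dict comprehension that does one filtered scan of the lines per feature.
import Mathlib
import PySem

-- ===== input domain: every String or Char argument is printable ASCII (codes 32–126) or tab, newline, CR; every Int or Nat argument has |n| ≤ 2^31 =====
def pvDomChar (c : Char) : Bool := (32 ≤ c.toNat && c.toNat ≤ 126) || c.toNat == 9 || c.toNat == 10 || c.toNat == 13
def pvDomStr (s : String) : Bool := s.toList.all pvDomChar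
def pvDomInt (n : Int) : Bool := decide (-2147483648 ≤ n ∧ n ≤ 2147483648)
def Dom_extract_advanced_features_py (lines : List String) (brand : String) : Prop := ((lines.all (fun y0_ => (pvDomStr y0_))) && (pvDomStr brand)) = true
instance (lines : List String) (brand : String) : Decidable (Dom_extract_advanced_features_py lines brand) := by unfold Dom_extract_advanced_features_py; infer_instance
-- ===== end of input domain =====

-- B replaces A's single line-major pass (dict with inline per-bucket branches) by a
-- keyword-table-driven bucket-major build: one filtered scan of the lines per feature (objective: idiomatic).


-- ===== PORT A =====
-- one loop over lines; each branch appends line.strip() to the matching bucket of the dict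
def pvAStep (d : PySem.Dict String (List String)) (line : String) : PySem.Dict String (List String) :=
  let line_lower := PySem.Str.lower line
  let d := if ["vpn", "ipsec", "pptp", "l2tp", "openvpn"].any (fun kw => PySem.Str.isIn kw line_lower)
           then d.modify "vpn_config" [] (· ++ [PySem.Str.strip line]) else d
  let d := if ["qos", "bandwidth", "priority", "traffic"].any (fun kw => PySem.Str.isIn kw line_lower)
           then d.modify "qos_settings" [] (· ++ [PySem.Str.strip line]) else d
  let d := if ["forward", "nat", "port", "redirect"].any (fun kw => PySem.Str.isIn kw line_lower)
           then d.modify "port_forwarding" [] (· ++ [PySem.Str.strip line]) else d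
  let d := if PySem.Str.isIn "snmp" line_lower
           then d.modify "snmp_config" [] (· ++ [PySem.Str.strip line]) else d
  let d := if ["log", "syslog", "debug"].any (fun kw => PySem.Str.isIn kw line_lower)
           then d.modify "logging_config" [] (· ++ [PySem.Str.strip line]) else d
  d

def extract_advanced_features_py (lines : List String) (brand : String) : List (String × List String) :=
  (lines.foldl pvAStep
    (PySem.Dict.ofList [("vpn_config", []), ("qos_settings", []), ("port_forwarding", []),
                        ("dynamic_dns", []), ("snmp_config", []), ("logging_config", [])])).items

-- ===== PORT B =====
def pvFeatureTable : List (String × List String) :=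
  [("vpn_config", ["vpn", "ipsec", "pptp", "l2tp", "openvpn"]),
   ("qos_settings", ["qos", "bandwidth", "priority", "traffic"]),
   ("port_forwarding", ["forward", "nat", "port", "redirect"]),
   ("dynamic_dns", []),
   ("snmp_config", ["snmp"]),
   ("logging_config", ["log", "syslog", "debug"])]

def extract_advanced_features_py_alt (lines : List String) (brand : String) : List (String × List String) :=
  pvFeatureTable.map (fun nk =>
    (nk.1, (lines.filter (fun line => nk.2.any (fun kw => PySem.Str.isIn kw (PySem.Str.lower line)))).map
             PySem.Str.strip))

-- ===== PRECONDITION & SPEC =====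
def Spec_extract_advanced_features_py (lines : List String) (brand : String) (out : List (String × List String)) : Prop := out = extract_advanced_features_py_alt lines brand
instance (lines : List String) (brand : String) (out : List (String × List String)) : Decidable (Spec_extract_advanced_features_py lines brand out) := by unfold Spec_extract_advanced_features_py; infer_instance

-- ===== CLAIM (what is proved, stated in full; the proofs are below) =====
def Claim_equal_extract_advanced_features_py : Prop := ∀ (lines : List String) (brand : String), Dom_extract_advanced_features_py lines brand → Spec_extract_advanced_features_py lines brand (extract_advanced_features_py lines brand)

-- ===== LEMMAS AND PROOFS =====

-- selection a bucket accumulates over `lines` for keyword list `kws`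
def pvSel (kws : List String) (lines : List String) : List String :=
  (lines.filter (fun line => kws.any (fun kw => PySem.Str.isIn kw (PySem.Str.lower line)))).map
    PySem.Str.strip

lemma pvSel_singleton_append (kws : List String) (h : String) (t : List String) :
    pvSel kws [h] ++ pvSel kws t = pvSel kws (h :: t) := by
  simp only [pvSel, List.filter_cons, List.filter_nil]
  split <;> simp

lemma pvA_inv (rest : List String) (V Q P S L : List String) :
    rest.foldl pvAStep
      (PySem.Dict.mk [("vpn_config", V), ("qos_settings", Q), ("port_forwarding", P),
                      ("dynamic_dns", []), ("snmp_config", S), ("logging_config", L)]) =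
    PySem.Dict.mk [("vpn_config", V ++ pvSel ["vpn", "ipsec", "pptp", "l2tp", "openvpn"] rest),
                   ("qos_settings", Q ++ pvSel ["qos", "bandwidth", "priority", "traffic"] rest),
                   ("port_forwarding", P ++ pvSel ["forward", "nat", "port", "redirect"] rest),
                   ("dynamic_dns", []),
                   ("snmp_config", S ++ pvSel ["snmp"] rest),
                   ("logging_config", L ++ pvSel ["log", "syslog", "debug"] rest)] := by
  induction rest generalizing V Q P S L with
  | nil => simp [pvSel]
  | cons h t ih =>
    rw [List.foldl_cons]
    have hstep : pvAStep (PySem.Dict.mk [("vpn_config", V), ("qos_settings", Q), ("port_forwarding", P),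
                      ("dynamic_dns", []), ("snmp_config", S), ("logging_config", L)]) h =
        PySem.Dict.mk [("vpn_config", V ++ pvSel ["vpn", "ipsec", "pptp", "l2tp", "openvpn"] [h]),
                   ("qos_settings", Q ++ pvSel ["qos", "bandwidth", "priority", "traffic"] [h]),
                   ("port_forwarding", P ++ pvSel ["forward", "nat", "port", "redirect"] [h]),
                   ("dynamic_dns", []),
                   ("snmp_config", S ++ pvSel ["snmp"] [h]),
                   ("logging_config", L ++ pvSel ["log", "syslog", "debug"] [h])] := by
      simp only [pvAStep, pvSel, List.filter_cons, List.filter_nil, List.map_cons, List.map_nil,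
        List.any_cons, List.any_nil, Bool.or_false]
      split_ifs <;>
        simp_all [PySem.Dict.modify, PySem.Dict.insert, PySem.Dict.getD, PySem.Dict.get?,
          PySem.Dict.contains]
    rw [hstep, ih]
    simp [pvSel_singleton_append, List.append_assoc]

theorem extract_advanced_features_py_spec : Claim_equal_extract_advanced_features_py := by
  intro lines brand _
  show extract_advanced_features_py lines brand = extract_advanced_features_py_alt lines brand
  unfold extract_advanced_features_py extract_advanced_features_py_alt
  have h0 : (PySem.Dict.ofList [("vpn_config", ([] : List String)), ("qos_settings", []), ("port_forwarding", []),
                        ("dynamic_dns", []), ("snmp_config", []), ("logging_config", [])]) =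
      PySem.Dict.mk [("vpn_config", []), ("qos_settings", []), ("port_forwarding", []),
                      ("dynamic_dns", []), ("snmp_config", []), ("logging_config", [])] := by decide
  rw [h0, pvA_inv]
  simp [pvFeatureTable, pvSel]
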